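-- pv_equiv track=rewrite | github.com/YIlyaA/LABS_python | additional/How many solutions 3.py | count_integer_solutions
-- ===== SOURCE A (Python) =====
-- def count_integer_solutions(n, x, y):
--     count = 0
--     for a in range(n + 1):
--         for b in range(n + 1):
--             for c in range(n + 1):
--                 for d in range(n + 1):
--                     if x * a**2 + y * b**2 == x * c**2 + y * d**2:
--                         count += 1
--     return count
-- ===== SOURCE B (Python) =====
-- def count_integer_solutions(n, x, y):
--     freq = {}
--     for a in range(n + 1):
--         for b in range(n + 1):
--             v = x * a**2 + y * b**2
--             freq[v] = freq.get(v, 0) + 1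
--     return sum(c * c for c in freq.values())
-- ===== Notes on version B (the rewrite author's own statement) =====
-- stated objective: faster
-- what changed: Replaces the O(n^4) quadruple loop by a single O(n^2) pass that builds a frequency map of x*a^2+y*b^2 over pairs (a,b) and returns the sum of squared frequencies.
import Mathlib
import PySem

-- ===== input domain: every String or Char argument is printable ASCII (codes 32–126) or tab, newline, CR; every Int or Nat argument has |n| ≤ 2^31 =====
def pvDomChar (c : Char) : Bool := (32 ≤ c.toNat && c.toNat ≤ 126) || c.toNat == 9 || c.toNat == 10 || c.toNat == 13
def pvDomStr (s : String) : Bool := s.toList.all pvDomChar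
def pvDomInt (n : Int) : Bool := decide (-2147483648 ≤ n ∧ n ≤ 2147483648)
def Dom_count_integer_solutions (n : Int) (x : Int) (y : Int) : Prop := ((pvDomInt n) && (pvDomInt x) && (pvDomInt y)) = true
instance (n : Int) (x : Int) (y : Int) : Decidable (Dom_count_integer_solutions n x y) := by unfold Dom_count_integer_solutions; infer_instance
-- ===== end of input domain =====

-- B replaces A's O(n^4) quadruple loop by one O(n^2) pass building a frequency map and summing squared counts (objective: faster).

-- ===== PORT A =====
def count_integer_solutions (n : Int) (x : Int) (y : Int) : Int :=
  (PySem.List.pyRange 0 (n + 1) 1).foldl (fun count a =>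
    (PySem.List.pyRange 0 (n + 1) 1).foldl (fun count b =>
      (PySem.List.pyRange 0 (n + 1) 1).foldl (fun count c =>
        (PySem.List.pyRange 0 (n + 1) 1).foldl (fun count d =>
          if x * a ^ 2 + y * b ^ 2 = x * c ^ 2 + y * d ^ 2 then count + 1 else count)
          count) count) count) 0

-- ===== PORT B =====
def count_integer_solutions_alt (n : Int) (x : Int) (y : Int) : Int :=
  let freq : PySem.Dict Int Int :=
    (PySem.List.pyRange 0 (n + 1) 1).foldl (fun freq a =>
      (PySem.List.pyRange 0 (n + 1) 1).foldl (fun freq b =>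
        let v := x * a ^ 2 + y * b ^ 2
        freq.insert v (freq.getD v 0 + 1)) freq) PySem.Dict.empty
  (freq.values.map (fun c => c * c)).sum

-- ===== PRECONDITION & SPEC =====
def Spec_count_integer_solutions (n : Int) (x : Int) (y : Int) (out : Int) : Prop := out = count_integer_solutions_alt n x y
instance (n : Int) (x : Int) (y : Int) (out : Int) : Decidable (Spec_count_integer_solutions n x y out) := by unfold Spec_count_integer_solutions; infer_instance

-- ===== CLAIM (what is proved, stated in full; the proofs are below) =====
def Claim_equal_count_integer_solutions : Prop := ∀ (n : Int) (x : Int) (y : Int), Dom_count_integer_solutions n x y → Spec_count_integer_solutions n x y (count_integer_solutions n x y)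

-- ===== LEMMAS AND PROOFS =====

-- the list of values x*a^2+y*b^2 over pairs (a,b), in loop order
def pvVals (n : Int) (x : Int) (y : Int) : List Int :=
  (PySem.List.pyRange 0 (n + 1) 1).flatMap (fun a =>
    (PySem.List.pyRange 0 (n + 1) 1).map (fun b => x * a ^ 2 + y * b ^ 2))

theorem pvFoldl_flatMap {α β γ : Type} (l : List α) (g : α → List β) (f : γ → β → γ) (init : γ) :
    (l.flatMap g).foldl f init = l.foldl (fun acc a => (g a).foldl f acc) init := by
  induction l generalizing init with
  | nil => simp
  | cons h t ih => simp [List.foldl_append, ih]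

theorem pvFoldl_ite {α : Type} (l : List α) (p : α → Prop) [DecidablePred p] (acc : Int) :
    l.foldl (fun acc x => if p x then acc + 1 else acc) acc
      = acc + (l.map (fun x => if p x then (1:Int) else 0)).sum := by
  induction l generalizing acc with
  | nil => simp
  | cons h t ih =>
    simp only [List.foldl_cons, List.map_cons, List.sum_cons]
    split_ifs <;> rw [ih] <;> ring

theorem pvSum_ite_count (l : List Int) (u : Int) :
    ((l.map (fun v => if u = v then (1:Int) else 0)).sum) = (l.count u : Int) := by
  induction l with
  | nil => simp
  | cons h t ih =>
    simp only [List.map_cons, List.sum_cons, List.count_cons, ih]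
    by_cases hu : u = h
    · simp [hu]; ring
    · simp [hu, Ne.symm hu]

theorem pvSum_flatMap {α β : Type} (l : List α) (h : α → List β) (g : β → Int) :
    ((l.flatMap h).map g).sum = (l.map (fun a => ((h a).map g).sum)).sum := by
  induction l with
  | nil => simp
  | cons a t ih => simp [List.flatMap_cons, List.sum_append, ih]

theorem pvSum_vals (n x y : Int) (g : Int → Int) :
    ((pvVals n x y).map g).sum =
      ((PySem.List.pyRange 0 (n + 1) 1).map (fun a =>
        ((PySem.List.pyRange 0 (n + 1) 1).map (fun b => g (x * a ^ 2 + y * b ^ 2))).sum)).sum := by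
  unfold pvVals
  rw [pvSum_flatMap]
  simp [List.map_map, Function.comp_def]

theorem pvA_eq_sum_count (n x y : Int) :
    count_integer_solutions n x y =
      ((pvVals n x y).map (fun u => ((pvVals n x y).count u : Int))).sum := by
  unfold count_integer_solutions
  simp only [pvFoldl_ite, PySem.List.foldl_add, zero_add]
  simp only [← pvSum_ite_count]
  simp only [pvSum_vals]

theorem pvB_eq_sum_sq (n x y : Int) :
    count_integer_solutions_alt n x y =
      ((PySem.List.dedup (pvVals n x y)).map
        (fun k => ((pvVals n x y).count k : Int) * ((pvVals n x y).count k : Int))).sum := by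
  unfold count_integer_solutions_alt
  have h1 : ((PySem.List.pyRange 0 (n + 1) 1).foldl (fun freq a =>
      (PySem.List.pyRange 0 (n + 1) 1).foldl (fun freq b =>
        let v := x * a ^ 2 + y * b ^ 2
        freq.insert v (freq.getD v 0 + 1)) freq) PySem.Dict.empty)
      = PySem.Dict.counter (pvVals n x y) := by
    rw [← PySem.Dict.foldl_insert_getD_add_one_eq_counter, pvVals, pvFoldl_flatMap]
    simp only [List.foldl_map]
  simp only [h1, PySem.Dict.values, PySem.Dict.items_counter, List.map_map, Function.comp_def,
    PySem.List.dedup_eq_ofList]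

theorem pvGroup (l : List Int) :
    (l.map (fun u => (l.count u : Int))).sum =
      ((PySem.List.dedup l).map (fun k => ((l.count k : Int)) * (l.count k : Int))).sum := by
  rw [Finset.sum_list_map_count, PySem.List.dedup_eq_ofList,
    ← List.sum_toFinset _ (PySem.Set.nodup_ofList l)]
  have hfin : (PySem.Set.ofList l).toFinset = l.toFinset := by
    ext a; simp [PySem.Set.mem_ofList]
  rw [hfin]
  refine Finset.sum_congr rfl fun a _ => ?_
  simp

-- ===== VERDICT (by name: the statement is the Claim_ definition above) =====
theorem count_integer_solutions_spec : Claim_equal_count_integer_solutions := by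
  intro n x y _
  unfold Spec_count_integer_solutions
  rw [pvA_eq_sum_count, pvB_eq_sum_sq, pvGroup]
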